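-- pv_equiv track=rewrite | github.com/ModelCloud/LogBar | logbar/logbar.py | _iter_contiguous_blocks
-- ===== SOURCE A (Python) =====
-- from typing import Iterable, Optional, Sequence, Union, TYPE_CHECKING
--
-- def _iter_contiguous_blocks(indexes: Sequence[int]):
--     """Group sorted row indexes into contiguous rewrite blocks."""
--
--     if not indexes:
--         return
--
--     start = indexes[0]
--     end = start
--     for index in indexes[1:]:
--         if index == end + 1:
--             end = index
--             continue
--         yield start, end
--         start = index
--         end = index
--     yield start, end
-- ===== SOURCE B (Python) =====
-- def _iter_contiguous_blocks(indexes):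
--     """Group sorted row indexes into contiguous rewrite blocks."""
--     if not indexes:
--         return
--     gaps = [(a, b) for a, b in zip(indexes, indexes[1:]) if b != a + 1]
--     starts = [indexes[0]] + [b for a, b in gaps]
--     ends = [a for a, b in gaps] + [indexes[-1]]
--     yield from zip(starts, ends)
-- ===== Notes on version B (the rewrite author's own statement) =====
-- stated objective: alternative
-- what changed: Replaces the stateful start/end run-tracking loop with a declarative pipeline: filter the zipped adjacent pairs for gaps, build the start and end lists from the gap pairs plus the endpoints, and zip them together.
import Mathlib
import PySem

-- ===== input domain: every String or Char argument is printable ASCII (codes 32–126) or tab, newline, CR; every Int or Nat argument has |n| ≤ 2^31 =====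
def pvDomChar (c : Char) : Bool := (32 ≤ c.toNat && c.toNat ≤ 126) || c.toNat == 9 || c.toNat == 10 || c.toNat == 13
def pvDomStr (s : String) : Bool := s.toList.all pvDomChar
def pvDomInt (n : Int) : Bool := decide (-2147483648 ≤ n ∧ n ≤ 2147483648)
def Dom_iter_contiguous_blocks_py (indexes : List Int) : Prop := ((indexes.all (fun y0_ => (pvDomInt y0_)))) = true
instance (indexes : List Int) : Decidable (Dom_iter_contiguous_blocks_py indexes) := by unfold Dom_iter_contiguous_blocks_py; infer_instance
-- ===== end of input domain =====

-- B replaces A's stateful run-tracking loop by a declarative pipeline (filter adjacent-pair gaps, rebuild start/end lists, zip); alternative decomposition, same cost.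


-- ===== PORT A =====
-- the generator loop of A: state (start, end), consuming indexes[1:]
def iterGoA (start e : Int) (xs : List Int) : List (Int × Int) :=
  match xs with
  | [] => [(start, e)]
  | i :: rest =>
    if i = e + 1 then iterGoA start i rest
    else (start, e) :: iterGoA i i rest

def iter_contiguous_blocks_py (indexes : List Int) : List (Int × Int) :=
  match indexes with
  | [] => []
  | x :: rest => iterGoA x x rest   -- start = indexes[0], end = start, loop over indexes[1:]

-- ===== PORT B =====
-- the gap predicate of B's comprehension: b != a + 1
def gapP (p : Int × Int) : Bool := decide (p.2 ≠ p.1 + 1)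

def iter_contiguous_blocks_py_alt (indexes : List Int) : List (Int × Int) :=
  match indexes with
  | [] => []
  | _ :: _ =>
    let gaps := (indexes.zip (PySem.List.slice indexes (some 1) none)).filter gapP
    let starts := (PySem.List.pyGet? indexes 0).getD 0 :: gaps.map Prod.snd
    let ends := gaps.map Prod.fst ++ [(PySem.List.pyGet? indexes (-1)).getD 0]
    starts.zip ends

-- ===== PRECONDITION & SPEC =====
def Spec_iter_contiguous_blocks_py (indexes : List Int) (out : List (Int × Int)) : Prop := out = iter_contiguous_blocks_py_alt indexes
instance (indexes : List Int) (out : List (Int × Int)) : Decidable (Spec_iter_contiguous_blocks_py indexes out) := by unfold Spec_iter_contiguous_blocks_py; infer_instance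

-- ===== CLAIM (what is proved, stated in full; the proofs are below) =====
def Claim_equal_iter_contiguous_blocks_py : Prop := ∀ (indexes : List Int), Dom_iter_contiguous_blocks_py indexes → Spec_iter_contiguous_blocks_py indexes (iter_contiguous_blocks_py indexes)

-- ===== LEMMAS AND PROOFS =====

-- Loop invariant: A's loop with state (start, e) over xs equals B's zip-of-filtered-pairs
-- construction applied to the pairs of (e :: xs), with last element defaulting to e.
lemma iterGoA_eq : ∀ (xs : List Int) (start e : Int),
    iterGoA start e xs =
      (start :: (((e :: xs).zip xs).filter gapP).map Prod.snd).zip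
        ((((e :: xs).zip xs).filter gapP).map Prod.fst ++ [xs.getLastD e]) := by
  intro xs
  induction xs with
  | nil => intro start e; simp [iterGoA]
  | cons i xs' ih =>
    intro start e
    by_cases h : i = e + 1
    · subst h
      simp only [iterGoA, List.zip_cons_cons, List.filter_cons, gapP]
      simp only [ne_eq, not_true_eq_false, decide_false, List.getLastD_cons]
      exact ih start (e + 1)
    · simp only [iterGoA, if_neg h, List.zip_cons_cons, List.filter_cons, gapP]
      simp only [ne_eq, h, not_false_eq_true, decide_true, List.getLastD_cons]
      exact congrArg (List.cons (start, e)) (ih i i)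

lemma getLast?_getD_cons (x : Int) (rest : List Int) :
    ((x :: rest).getLast?.getD 0) = rest.getLastD x := by
  induction rest generalizing x with
  | nil => simp
  | cons y ys ih => rw [List.getLastD_cons, ← ih y, List.getLast?_cons_cons]

-- ===== VERDICT (by name: the statement is the Claim_ definition above) =====
theorem iter_contiguous_blocks_py_spec : Claim_equal_iter_contiguous_blocks_py := by
  intro indexes _
  unfold Spec_iter_contiguous_blocks_py iter_contiguous_blocks_py iter_contiguous_blocks_py_alt
  cases indexes with
  | nil => rfl
  | cons x rest =>
    simp only [PySem.List.slice_from_one, List.tail_cons, PySem.List.pyGet?_zero_cons,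
      PySem.List.pyGet?_neg_one, Option.getD_some]
    rw [getLast?_getD_cons]
    exact iterGoA_eq rest x x
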